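-- pv_equiv track=rewrite | github.com/aymanopen/kmeans-implementation-alphabet | packages_alphabet_detect/myown.py | performance_calculator
-- ===== SOURCE A (Python) =====
-- def performance_calculator(results,alphabet):
--     final_res=[]
--     for i,_ in enumerate(alphabet[0:len(results)]):
--         count_correct=0
--         count_tot=0
--         for r in results:
--             if r[0]==i:
--                 if r[1]==r[0]:
--                     count_correct+=1
--                 count_tot+=1
--         final_res.append([count_correct, count_tot])
--     return final_res
-- ===== SOURCE B (Python) =====
-- def performance_calculator(results, alphabet):
--     n = min(len(alphabet), len(results))
--     if n == 0:
--         return []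
--     correct = [0] * n
--     total = [0] * n
--     for r in results:
--         lab = r[0]
--         if 0 <= lab < n:
--             if r[1] == lab:
--                 correct[lab] += 1
--             total[lab] += 1
--     return [[correct[i], total[i]] for i in range(n)]
-- ===== Notes on version B (the rewrite author's own statement) =====
-- stated objective: alternative
-- what changed: Replaces A's per-label rescan of the whole results list (one inner pass over results for every alphabet index) by a single pass over results that accumulates correct/total counts into two label-indexed arrays, then emits the [correct,total] pairs from the arrays.
import Mathlib
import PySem

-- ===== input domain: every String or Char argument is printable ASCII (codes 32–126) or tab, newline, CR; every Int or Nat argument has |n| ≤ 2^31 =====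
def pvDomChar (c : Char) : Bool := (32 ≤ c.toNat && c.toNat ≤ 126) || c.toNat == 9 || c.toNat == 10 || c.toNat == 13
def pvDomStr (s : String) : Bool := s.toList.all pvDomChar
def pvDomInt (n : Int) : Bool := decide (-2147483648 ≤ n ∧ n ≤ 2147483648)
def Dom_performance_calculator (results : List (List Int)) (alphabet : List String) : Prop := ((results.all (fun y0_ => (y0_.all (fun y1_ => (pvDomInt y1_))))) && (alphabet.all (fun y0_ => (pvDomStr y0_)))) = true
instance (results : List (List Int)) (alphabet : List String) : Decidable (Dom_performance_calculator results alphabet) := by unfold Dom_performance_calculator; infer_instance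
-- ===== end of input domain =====

-- B replaces A's per-label rescan of the results list by a single pass over results that
-- accumulates [correct,total] counts into two label-indexed arrays (alternative algorithm).

-- ===== PORT A =====
-- r[0] / r[1] with the IndexError case excluded by Pre_ (the .getD default is never read under Pre_)
def performance_calculator (results : List (List Int)) (alphabet : List String) : List (List Int) :=
  (List.range (PySem.List.slice alphabet (some 0) (some (results.length : Int))).length).foldl
    (fun final_res (i : Nat) =>
      let p := results.foldl
        (fun (c : Int × Int) r =>
          if (PySem.List.pyGet? r 0).getD 0 = (i : Int) then
            ((if (PySem.List.pyGet? r 1).getD 0 = (PySem.List.pyGet? r 0).getD 0 then c.1 + 1 else c.1),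
             c.2 + 1)
          else c)
        (0, 0)
      final_res ++ [[p.1, p.2]])
    []

-- ===== PORT B =====
def performance_calculator_alt (results : List (List Int)) (alphabet : List String) : List (List Int) :=
  let n := min alphabet.length results.length
  if n = 0 then []
  else
    let ct := results.foldl
      (fun (ct : List Int × List Int) r =>
        let lab := (PySem.List.pyGet? r 0).getD 0
        if 0 ≤ lab ∧ lab < (n : Int) then
          let correct := if (PySem.List.pyGet? r 1).getD 0 = lab
            then ct.1.set lab.toNat (ct.1.getD lab.toNat 0 + 1) else ct.1
          let total := ct.2.set lab.toNat (ct.2.getD lab.toNat 0 + 1)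
          (correct, total)
        else ct)
      (List.replicate n 0, List.replicate n 0)
    (List.range n).map (fun i => [ct.1.getD i 0, ct.2.getD i 0])

-- ===== PRECONDITION & SPEC =====
-- Pre_ excludes exactly the inputs where the Python raises IndexError (identically in A and B):
-- when the loop runs, r[0] needs r nonempty, and r[1] is read when r[0] is an in-range label.
def Pre_performance_calculator (results : List (List Int)) (alphabet : List String) : Prop :=
  min alphabet.length results.length = 0 ∨
    ∀ r ∈ results, r ≠ [] ∧
      (0 ≤ r.headI ∧ r.headI < (min alphabet.length results.length : Int) → 2 ≤ r.length)
instance (results : List (List Int)) (alphabet : List String) : Decidable (Pre_performance_calculator results alphabet) := by unfold Pre_performance_calculator; infer_instance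
def pvWitness_performance_calculator : List (List Int) × List String :=
  ([[0, 0], [1, 0], [0, 1]], ["a", "b"])
def Spec_performance_calculator (results : List (List Int)) (alphabet : List String) (out : List (List Int)) : Prop := out = performance_calculator_alt results alphabet
instance (results : List (List Int)) (alphabet : List String) (out : List (List Int)) : Decidable (Spec_performance_calculator results alphabet out) := by unfold Spec_performance_calculator; infer_instance

-- ===== CLAIM (what is proved, stated in full; the proofs are below) =====
def Claim_equal_performance_calculator : Prop := ∀ (results : List (List Int)) (alphabet : List String), Dom_performance_calculator results alphabet → Pre_performance_calculator results alphabet → Spec_performance_calculator results alphabet (performance_calculator results alphabet)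

-- ===== LEMMAS AND PROOFS =====

-- the two field accesses both ports share
def pvR0 (r : List Int) : Int := (PySem.List.pyGet? r 0).getD 0
def pvR1 (r : List Int) : Int := (PySem.List.pyGet? r 1).getD 0

-- reference counts for a label
def pvCcnt : List (List Int) → Int → Int
  | [], _ => 0
  | r :: rs, lab => (if pvR0 r = lab ∧ pvR1 r = pvR0 r then 1 else 0) + pvCcnt rs lab
def pvTcnt : List (List Int) → Int → Int
  | [], _ => 0
  | r :: rs, lab => (if pvR0 r = lab then 1 else 0) + pvTcnt rs lab

lemma pvA_inner (rs : List (List Int)) (i : Int) : ∀ a b : Int,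
    rs.foldl
      (fun (c : Int × Int) r =>
        if (PySem.List.pyGet? r 0).getD 0 = i then
          ((if (PySem.List.pyGet? r 1).getD 0 = (PySem.List.pyGet? r 0).getD 0 then c.1 + 1 else c.1),
           c.2 + 1)
        else c)
      (a, b) = (a + pvCcnt rs i, b + pvTcnt rs i) := by
  induction rs with
  | nil => intro a b; simp [pvCcnt, pvTcnt]
  | cons r rs ih =>
    intro a b
    simp only [List.foldl_cons, pvCcnt, pvTcnt, pvR0, pvR1]
    by_cases h0 : (PySem.List.pyGet? r 0).getD 0 = i
    · by_cases h1 : (PySem.List.pyGet? r 1).getD 0 = (PySem.List.pyGet? r 0).getD 0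
      · rw [if_pos h0, if_pos h1, ih, if_pos ⟨h0, h1⟩, if_pos h0]
        simp only [Prod.mk.injEq]; constructor <;> ring
      · rw [if_pos h0, if_neg h1, ih, if_neg (fun h => h1 h.2), if_pos h0]
        simp only [Prod.mk.injEq]; constructor <;> ring
    · rw [if_neg h0, ih, if_neg (fun h => h0 h.1), if_neg h0]
      simp only [Prod.mk.injEq]; constructor <;> ring

lemma pvA_outer (results : List (List Int)) : ∀ (l : List Nat) (acc : List (List Int)),
    l.foldl
      (fun final_res (i : Nat) =>
        let p := results.foldl
          (fun (c : Int × Int) r =>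
            if (PySem.List.pyGet? r 0).getD 0 = (i : Int) then
              ((if (PySem.List.pyGet? r 1).getD 0 = (PySem.List.pyGet? r 0).getD 0 then c.1 + 1 else c.1),
               c.2 + 1)
            else c)
          (0, 0)
        final_res ++ [[p.1, p.2]])
      acc = acc ++ l.map (fun (i : Nat) => [pvCcnt results (i : Int), pvTcnt results (i : Int)]) := by
  intro l
  induction l with
  | nil => simp
  | cons x xs ih =>
    intro acc
    rw [List.foldl_cons]
    dsimp only
    rw [ih, pvA_inner results (x : Int) 0 0]
    simp

lemma pvA_eq_map (results : List (List Int)) (alphabet : List String) :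
    performance_calculator results alphabet =
      (List.range (min alphabet.length results.length)).map
        (fun (i : Nat) => [pvCcnt results (i : Int), pvTcnt results (i : Int)]) := by
  unfold performance_calculator
  have hl : (PySem.List.slice alphabet (some 0) (some (results.length : Int))).length
      = min alphabet.length results.length := by
    simp [PySem.List.slice_zero_start, PySem.List.slice_to_natCast]
    omega
  rw [hl, pvA_outer]
  simp only [List.nil_append]

-- getD after set: bump at k, read at j
lemma pv_getD_set (l : List Int) (k j : Nat) (hk : k < l.length) :
    (l.set k (l.getD k 0 + 1)).getD j 0 = l.getD j 0 + (if j = k then 1 else 0) := by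
  by_cases h : j = k
  · subst h; simp [List.getD, List.getElem?_set_self hk, List.getElem?_eq_getElem hk]
  · simp [List.getD, List.getElem?_set_ne (by omega : k ≠ j), h]

-- invariant of B's single pass
lemma pvB_inv (n : Nat) (rs : List (List Int)) : ∀ (c t : List Int),
    c.length = n → t.length = n →
    (let res := rs.foldl
        (fun (ct : List Int × List Int) r =>
          let lab := (PySem.List.pyGet? r 0).getD 0
          if 0 ≤ lab ∧ lab < (n : Int) then
            let correct := if (PySem.List.pyGet? r 1).getD 0 = lab
              then ct.1.set lab.toNat (ct.1.getD lab.toNat 0 + 1) else ct.1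
            let total := ct.2.set lab.toNat (ct.2.getD lab.toNat 0 + 1)
            (correct, total)
          else ct)
        (c, t)
     res.1.length = n ∧ res.2.length = n ∧
       ∀ j < n, res.1.getD j 0 = c.getD j 0 + pvCcnt rs (j : Int) ∧
                res.2.getD j 0 = t.getD j 0 + pvTcnt rs (j : Int)) := by
  induction rs with
  | nil => intro c t hc ht; refine ⟨hc, ht, ?_⟩; intro j hj; simp [pvCcnt, pvTcnt]
  | cons r rs ih =>
    intro c t hc ht
    dsimp only
    rw [List.foldl_cons]
    dsimp only
    by_cases hg : 0 ≤ (PySem.List.pyGet? r 0).getD 0 ∧ (PySem.List.pyGet? r 0).getD 0 < (n : Int)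
    · rw [if_pos hg]
      have hltn : ((PySem.List.pyGet? r 0).getD 0).toNat < n := by omega
      by_cases h1 : (PySem.List.pyGet? r 1).getD 0 = (PySem.List.pyGet? r 0).getD 0
      · rw [if_pos h1]
        obtain ⟨l1, l2, h3⟩ := ih
          (c.set ((PySem.List.pyGet? r 0).getD 0).toNat
            (c.getD ((PySem.List.pyGet? r 0).getD 0).toNat 0 + 1))
          (t.set ((PySem.List.pyGet? r 0).getD 0).toNat
            (t.getD ((PySem.List.pyGet? r 0).getD 0).toNat 0 + 1))
          (by simp [hc]) (by simp [ht])
        refine ⟨l1, l2, ?_⟩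
        intro j hj
        obtain ⟨e1, e2⟩ := h3 j hj
        refine ⟨?_, ?_⟩
        · rw [e1, pv_getD_set c _ j (by omega)]
          simp only [pvCcnt, pvR0, pvR1]
          by_cases hj2 : (PySem.List.pyGet? r 0).getD 0 = (j : Int)
          · rw [if_pos (show j = ((PySem.List.pyGet? r 0).getD 0).toNat by omega),
                if_pos ⟨hj2, h1⟩]; ring
          · rw [if_neg (show ¬ j = ((PySem.List.pyGet? r 0).getD 0).toNat by omega),
                if_neg (fun h => hj2 h.1)]; ring
        · rw [e2, pv_getD_set t _ j (by omega)]
          simp only [pvTcnt, pvR0]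
          by_cases hj2 : (PySem.List.pyGet? r 0).getD 0 = (j : Int)
          · rw [if_pos hj2, if_pos (by omega)]; ring
          · rw [if_neg hj2, if_neg (by omega)]; ring
      · rw [if_neg h1]
        obtain ⟨l1, l2, h3⟩ := ih c
          (t.set ((PySem.List.pyGet? r 0).getD 0).toNat
            (t.getD ((PySem.List.pyGet? r 0).getD 0).toNat 0 + 1))
          hc (by simp [ht])
        refine ⟨l1, l2, ?_⟩
        intro j hj
        obtain ⟨e1, e2⟩ := h3 j hj
        refine ⟨?_, ?_⟩
        · rw [e1]
          simp only [pvCcnt, pvR1]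
          rw [if_neg (fun h => h1 h.2)]; ring
        · rw [e2, pv_getD_set t _ j (by omega)]
          simp only [pvTcnt, pvR0]
          by_cases hj2 : (PySem.List.pyGet? r 0).getD 0 = (j : Int)
          · rw [if_pos hj2, if_pos (by omega)]; ring
          · rw [if_neg hj2, if_neg (by omega)]; ring
    · rw [if_neg hg]
      obtain ⟨l1, l2, h3⟩ := ih c t hc ht
      refine ⟨l1, l2, ?_⟩
      intro j hj
      obtain ⟨e1, e2⟩ := h3 j hj
      have hne : ¬ (PySem.List.pyGet? r 0).getD 0 = (j : Int) := by omega
      refine ⟨?_, ?_⟩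
      · rw [e1]; simp only [pvCcnt, pvR0]; rw [if_neg (fun h => hne h.1)]; ring
      · rw [e2]; simp only [pvTcnt, pvR0]; rw [if_neg hne]; ring

lemma pvB_eq_map (results : List (List Int)) (alphabet : List String) :
    performance_calculator_alt results alphabet =
      (List.range (min alphabet.length results.length)).map
        (fun (i : Nat) => [pvCcnt results (i : Int), pvTcnt results (i : Int)]) := by
  unfold performance_calculator_alt
  dsimp only
  by_cases h0 : min alphabet.length results.length = 0
  · simp [h0]
  · rw [if_neg h0]
    obtain ⟨-, -, h3⟩ := pvB_inv (min alphabet.length results.length) results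
      (List.replicate (min alphabet.length results.length) 0)
      (List.replicate (min alphabet.length results.length) 0)
      (by simp) (by simp)
    apply List.map_congr_left
    intro i hi
    rw [List.mem_range] at hi
    obtain ⟨e1, e2⟩ := h3 i hi
    rw [e1, e2]
    simp [List.getD, hi]

-- ===== VERDICT (by name: the statement is the Claim_ definition above) =====
theorem performance_calculator_spec : Claim_equal_performance_calculator := by
  intro results alphabet _ _
  unfold Spec_performance_calculator
  rw [pvA_eq_map, pvB_eq_map]
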